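-- pv_equiv track=rewrite | github.com/dsfb/MyPythonProjects | JetBrainsAcademy/Flask Developer Track/Challenging/Calculator for Investors/main.py | handle_equal_ticker_case_list
-- ===== SOURCE A (Python) =====
-- def handle_equal_ticker_case_list(financial_list):
--     reverse_financial_dict = {}
--     for row in financial_list:
--         ticker, value = row.split(' ')
--         if value not in reverse_financial_dict:
--             reverse_financial_dict[value] = list()
--         reverse_financial_dict[value].append(ticker)
--
--     reverse_financial_dict = {key: sorted(value, reverse=(len(value) > 2)) for key, value in
--                               reverse_financial_dict.items()}
--     key_list = list(reverse_financial_dict.keys())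
--     key_list = sorted(key_list, reverse=True)
--     new_financial_list = []
--     for key in key_list:
--         for value in reverse_financial_dict[key]:
--             new_financial_list.append(f'{value} {key}')
--     return new_financial_list
-- ===== SOURCE B (Python) =====
-- def handle_equal_ticker_case_list(financial_list):
--     pairs = []
--     for row in financial_list:
--         ticker, value = row.split(' ')
--         pairs.append((ticker, value))
--     new_financial_list = []
--     for value in sorted({v for _, v in pairs}, reverse=True):
--         tickers = [t for t, v in pairs if v == value]
--         for t in sorted(tickers, reverse=len(tickers) > 2):
--             new_financial_list.append(f'{t} {value}')
--     return new_financial_list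
-- ===== Notes on version B (the rewrite author's own statement) =====
-- stated objective: simpler
-- what changed: Replaces A's dict-of-lists accumulation plus a dict comprehension and key-list rebuild by a direct pass: sort the distinct value strings descending and, for each, filter the parsed (ticker, value) pairs and emit the sorted tickers.
import Mathlib
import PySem

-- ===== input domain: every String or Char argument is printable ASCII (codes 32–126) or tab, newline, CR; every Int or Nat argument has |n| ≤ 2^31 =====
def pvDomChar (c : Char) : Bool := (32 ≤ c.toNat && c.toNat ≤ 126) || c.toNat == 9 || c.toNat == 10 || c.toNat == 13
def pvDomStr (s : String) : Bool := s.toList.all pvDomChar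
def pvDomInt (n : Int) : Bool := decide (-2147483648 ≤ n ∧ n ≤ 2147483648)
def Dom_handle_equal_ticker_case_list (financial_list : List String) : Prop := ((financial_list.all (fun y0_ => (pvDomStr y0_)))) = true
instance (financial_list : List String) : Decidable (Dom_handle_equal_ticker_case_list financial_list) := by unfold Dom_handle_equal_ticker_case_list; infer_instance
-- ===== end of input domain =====

-- B replaces A's dict-of-lists accumulation by a sort of the distinct values with a per-value filter pass (no dict); equivalence of the return values is proved on rows that split on ' ' into exactly two fields (elsewhere Python A raises ValueError).

-- shared helper: the line `ticker, value = row.split(' ')` of both Pythons ("","") stands in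
-- for the (excluded) case where the unpacking would raise ValueError
def pvSplitRow (row : String) : String × String :=
  match PySem.Str.split? row " " with
  | some [t, v] => (t, v)
  | _ => ("", "")

-- ===== PORT A =====
def handle_equal_ticker_case_list (financial_list : List String) : List String :=
  let d := financial_list.foldl (fun d row =>
    let tv := pvSplitRow row
    let d := if d.contains tv.2 then d else d.insert tv.2 ([] : List String)
    d.modify tv.2 [] (fun l => l ++ [tv.1])) PySem.Dict.empty
  let d2 := d.items.foldl (fun d2 kv =>
    d2.insert kv.1 (PySem.List.sorted kv.2 (fun x => x) (decide (kv.2.length > 2))))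
    (PySem.Dict.empty : PySem.Dict String (List String))
  let key_list := d2.keys
  let key_list := PySem.List.sorted key_list (fun x => x) true
  key_list.foldl (fun acc key =>
    (d2.getD key []).foldl (fun acc value => acc ++ [value ++ " " ++ key]) acc) []

-- ===== PORT B =====
def handle_equal_ticker_case_list_alt (financial_list : List String) : List String :=
  let pairs : List (String × String) := financial_list.foldl (fun ps row => ps ++ [pvSplitRow row]) []
  let vals := PySem.List.sorted (PySem.Set.ofList (pairs.map (fun p => p.2))) (fun x => x) true
  vals.foldl (fun acc value =>
    let tickers := (pairs.filter (fun p => p.2 == value)).map (fun p => p.1)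
    (PySem.List.sorted tickers (fun x => x) (decide (tickers.length > 2))).foldl
      (fun acc t => acc ++ [t ++ " " ++ value]) acc) []

-- ===== PRECONDITION & SPEC =====
-- Pre_ excludes exactly the rows on which `ticker, value = row.split(' ')` raises ValueError
-- (a row with a number of spaces different from one); A raises there, so nothing is claimed.
def Pre_handle_equal_ticker_case_list (financial_list : List String) : Prop :=
  ∀ row ∈ financial_list, PySem.Str.count row " " = 1
instance (financial_list : List String) : Decidable (Pre_handle_equal_ticker_case_list financial_list) := by unfold Pre_handle_equal_ticker_case_list; infer_instance
def pvWitness_handle_equal_ticker_case_list : List String := ["AAPL 1.5", "MSFT 1.5", "V 2"]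
def Spec_handle_equal_ticker_case_list (financial_list : List String) (out : List String) : Prop := out = handle_equal_ticker_case_list_alt financial_list
instance (financial_list : List String) (out : List String) : Decidable (Spec_handle_equal_ticker_case_list financial_list out) := by unfold Spec_handle_equal_ticker_case_list; infer_instance

-- ===== CLAIM (what is proved, stated in full; the proofs are below) =====
def Claim_equal_handle_equal_ticker_case_list : Prop := ∀ (financial_list : List String), Dom_handle_equal_ticker_case_list financial_list → Pre_handle_equal_ticker_case_list financial_list → Spec_handle_equal_ticker_case_list financial_list (handle_equal_ticker_case_list financial_list)

-- ===== LEMMAS AND PROOFS =====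

-- A's per-row step (ensure-key-then-append) is one `modify`
lemma pv_step_eq (d : PySem.Dict String (List String)) (tv : String × String) :
    (if d.contains tv.2 then d else d.insert tv.2 ([] : List String)).modify tv.2 []
      (fun l => l ++ [tv.1]) = d.modify tv.2 [] (fun l => l ++ [tv.1]) := by
  by_cases h : d.contains tv.2 = true
  · simp [h]
  · have h0 : d.getD tv.2 ([] : List String) = [] := by
      apply PySem.Dict.getD_of_not_contains; simpa using h
    simp only [h, Bool.false_eq_true, if_false, PySem.Dict.modify,
      PySem.Dict.getD_insert_self, PySem.Dict.insert_insert_self, h0]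

-- lookup in an items list whose values were mapped (keys untouched)
lemma pv_find?_map {β : Type} (g : List β → List β) (k : String) (its : List (String × List β)) :
    List.find? (fun p => p.1 == k) (its.map (fun kv => (kv.1, g kv.2)))
      = (List.find? (fun p => p.1 == k) its).map (fun kv => (kv.1, g kv.2)) := by
  induction its with
  | nil => rfl
  | cons kv rest ih =>
      by_cases h : kv.1 == k
      · simp [List.find?, h]
      · simp only [List.map_cons, List.find?, h]; exact ih

-- ===== VERDICT =====
theorem handle_equal_ticker_case_list_spec : Claim_equal_handle_equal_ticker_case_list := by
  intro financial_list _ _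
  unfold Spec_handle_equal_ticker_case_list
  unfold handle_equal_ticker_case_list handle_equal_ticker_case_list_alt
  simp only [PySem.List.foldl_append_singleton_eq_map, List.nil_append]
  set P := financial_list.map pvSplitRow with hP
  -- A's first loop is a `modify` fold over the (value, ticker) pairs
  have hd : financial_list.foldl (fun d row =>
        let tv := pvSplitRow row
        let d := if d.contains tv.2 then d else d.insert tv.2 ([] : List String)
        d.modify tv.2 [] (fun l => l ++ [tv.1])) PySem.Dict.empty
      = (P.map (fun p => (p.2, p.1))).foldl
          (fun d p => d.modify p.1 [] (fun l => l ++ [p.2])) PySem.Dict.empty := by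
    rw [hP, List.foldl_map, List.foldl_map]
    apply PySem.List.foldl_congr_mem
    intro acc row _
    exact pv_step_eq acc (pvSplitRow row)
  rw [hd]
  set Q := P.map (fun p => (p.2, p.1)) with hQ
  set d := Q.foldl (fun d p => d.modify p.1 [] (fun l => l ++ [p.2])) PySem.Dict.empty with hdq
  have hgetD : ∀ c, d.getD c [] = (P.filter (fun p => p.2 == c)).map (fun p => p.1) := by
    intro c
    rw [hdq, PySem.Dict.getD_foldl_modify_append, hQ]
    simp [List.filter_map, List.map_map, Function.comp_def]
  have hkeys : d.keys = PySem.Set.ofList (P.map (fun p => p.2)) := by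
    rw [hdq, PySem.Dict.keys_foldl_modify_key Q (fun p => p.1) ([] : List String)
      (fun _ p => (fun l => l ++ [p.2]))]
    simp only [hQ, List.map_map]
    rfl
  -- the dict comprehension: fresh distinct keys, values sorted
  set g : List String → List String :=
    fun v => PySem.List.sorted v (fun x => x) (decide (v.length > 2)) with hg
  have hnodup : (d.items.map (fun kv => kv.1)).Nodup := by
    have : d.keys = d.items.map (fun kv => kv.1) := rfl
    rw [← this, hkeys]; exact PySem.Set.nodup_ofList _
  have hitems : (d.items.foldl (fun d2 kv =>
        d2.insert kv.1 (PySem.List.sorted kv.2 (fun x => x) (decide (kv.2.length > 2))))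
        (PySem.Dict.empty : PySem.Dict String (List String))).items
      = d.items.map (fun kv => (kv.1, g kv.2)) := by
    rw [PySem.Dict.items_foldl_insert_fresh d.items (fun kv => kv.1) (fun kv => g kv.2)
      PySem.Dict.empty (fun a _ => by simp [PySem.Dict.contains_empty]) hnodup]
    rfl
  set d2 := d.items.foldl (fun d2 kv =>
    d2.insert kv.1 (PySem.List.sorted kv.2 (fun x => x) (decide (kv.2.length > 2))))
    (PySem.Dict.empty : PySem.Dict String (List String)) with hd2
  have hkeys2 : d2.keys = d.keys := by
    show d2.items.map (fun kv => kv.1) = d.items.map (fun kv => kv.1)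
    rw [hitems, List.map_map]; rfl
  have hgetD2 : ∀ c, d2.getD c [] = g (d.getD c []) := by
    intro c
    simp only [PySem.Dict.getD, PySem.Dict.get?, hitems, pv_find?_map g c d.items]
    cases List.find? (fun p => p.1 == c) d.items with
    | none => simp [hg, PySem.List.sorted_eq_nil_iff]
    | some kv => simp
  rw [hkeys2, hkeys]
  congr 1
  funext acc c
  rw [hgetD2 c, hgetD c, hg]
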